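-- pv_equiv track=rewrite | github.com/Ylfcynn/Python_Practice | anagram.py | anagram_proc
-- ===== SOURCE A (Python) =====
-- import string
--
-- def anagram_proc(word):
--     """
--     For each input, builds a list of only lowercase letters, 'nekked_little', and generates a second list, 'digisig'. by
--     counting incidences of letters in nekked_little. digi_sig is a list of integers.
--
--     """
--
--     alphabet = string.ascii_lowercase
--
--     squashed = word.casefold()
--
--     nekked_little = list()
--
--     for char in squashed:
--         if char in alphabet:
--             nekked_little.append(char)
--
--     digisig = list()
--
--     for letter in alphabet:
--         if letter in nekked_little:
--             digisig.append(nekked_little.count(letter))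
--
--     return digisig
-- ===== SOURCE B (Python) =====
-- import string
-- from itertools import groupby
--
--
-- def anagram_proc(word):
--     """Sort the filtered lowercase letters and emit run lengths via groupby
--     instead of scanning the alphabet and counting each letter."""
--     letters = sorted(c for c in word.casefold() if c in string.ascii_lowercase)
--     return [len(list(group)) for _, group in groupby(letters)]
-- ===== Notes on version B (the rewrite author's own statement) =====
-- stated objective: alternative
-- what changed: Replaced the 26-letter alphabet scan with an inner list.count pass over the filtered letters by sorting the filtered letters once and emitting the length of each consecutive equal run with itertools.groupby.
import Mathlib
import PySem

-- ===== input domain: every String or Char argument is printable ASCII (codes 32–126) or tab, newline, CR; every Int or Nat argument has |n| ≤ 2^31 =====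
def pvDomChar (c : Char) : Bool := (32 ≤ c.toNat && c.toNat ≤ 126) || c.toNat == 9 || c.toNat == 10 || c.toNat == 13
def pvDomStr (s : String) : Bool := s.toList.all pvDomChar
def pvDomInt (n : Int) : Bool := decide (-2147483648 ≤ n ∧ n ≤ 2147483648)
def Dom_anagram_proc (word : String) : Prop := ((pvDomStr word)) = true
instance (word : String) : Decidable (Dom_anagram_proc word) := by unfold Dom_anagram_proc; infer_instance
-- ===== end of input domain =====

-- B sorts the filtered letters once and emits consecutive-run lengths (groupby)
-- instead of A's alphabet scan with a count pass per present letter; return values agree.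


-- ===== PORT A =====
-- 'word.casefold()' is ported as PySem.Chars.lower: exact on the printable-ASCII domain.
-- 'char in alphabet' (single char in a string of distinct chars) is character membership.
def anagram_proc (word : String) : List Int :=
  let alphabet : List Char := "abcdefghijklmnopqrstuvwxyz".toList
  let squashed : List Char := PySem.Chars.lower word.toList
  let nekked_little : List Char :=
    squashed.foldl (fun acc c => if alphabet.contains c then acc ++ [c] else acc) []
  alphabet.foldl
    (fun acc l => if nekked_little.contains l then acc ++ [(nekked_little.count l : Int)] else acc) []

-- ===== PORT B =====
-- itertools.groupby over a sorted list: one run per loop step, emitting the run's length.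
def runLens : List Char → List Int
  | [] => []
  | c :: rest =>
      ((1 + (rest.takeWhile (· == c)).length : Nat) : Int) :: runLens (rest.dropWhile (· == c))
  termination_by l => l.length
  decreasing_by
    simpa using Nat.lt_succ_of_le (List.length_dropWhile_le (· == c) rest)

def anagram_proc_alt (word : String) : List Int :=
  let alphabet : List Char := "abcdefghijklmnopqrstuvwxyz".toList
  let letters : List Char :=
    PySem.List.sorted ((PySem.Chars.lower word.toList).filter (fun c => alphabet.contains c))
      (fun c => c) false
  runLens letters

-- ===== PRECONDITION & SPEC =====
def Spec_anagram_proc (word : String) (out : List Int) : Prop := out = anagram_proc_alt word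
instance (word : String) (out : List Int) : Decidable (Spec_anagram_proc word out) := by unfold Spec_anagram_proc; infer_instance

-- ===== CLAIM (what is proved, stated in full; the proofs are below) =====
def Claim_equal_anagram_proc : Prop := ∀ (word : String), Dom_anagram_proc word → Spec_anagram_proc word (anagram_proc word)

-- ===== LEMMAS AND PROOFS =====

-- On a ≤-sorted list whose elements are all ≥ a, the leading (· == a) run is exactly
-- the occurrences of a: its length is the count, and a does not occur after it.
lemma run_split (a : Char) : ∀ (S : List Char), S.Pairwise (· ≤ ·) → (∀ x ∈ S, a ≤ x) →
    (S.takeWhile (· == a)).length = S.count a ∧ a ∉ S.dropWhile (· == a) := by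
  intro S
  induction S with
  | nil => simp
  | cons x xs ih =>
    intro hp hmin
    by_cases hxa : x = a
    · subst hxa
      have h := ih hp.of_cons (fun y hy => hmin y (by simp [hy]))
      simp [List.takeWhile, List.dropWhile, h.1, h.2]
    · have hax : a < x := lt_of_le_of_ne (hmin x (by simp)) (Ne.symm hxa)
      have hnotmem : a ∉ x :: xs := by
        intro hmem
        rcases List.mem_cons.1 hmem with h | h
        · exact hxa h.symm
        · exact absurd (rfl : a = a)
            (ne_of_gt (lt_of_lt_of_le hax ((List.pairwise_cons.1 hp).1 a h)))
      have hbeq : (x == a) = false := by simp [hxa]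
      constructor
      · simp [List.takeWhile, hbeq, List.count_eq_zero.2 hnotmem]
      · simpa [List.dropWhile, hbeq] using hnotmem

-- Run lengths of a ≤-sorted list S over a <-sorted universe 'alpha':
-- exactly A's "for each alpha letter present in S, its count".
lemma runLens_eq : ∀ (alpha S : List Char), alpha.Pairwise (· < ·) → S.Pairwise (· ≤ ·) →
    (∀ x ∈ S, x ∈ alpha) →
    runLens S = (alpha.filter (fun b => S.contains b)).map (fun b => (S.count b : Int)) := by
  intro alpha
  induction alpha with
  | nil =>
    intro S _ _ hsub
    have : S = [] := List.eq_nil_iff_forall_not_mem.2 (fun x hx => by simpa using hsub x hx)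
    simp [this, runLens]
  | cons a rest ih =>
    intro S hpa hps hsub
    have hrest : ∀ b ∈ rest, a < b := (List.pairwise_cons.1 hpa).1
    by_cases hmem : a ∈ S
    · -- a is the minimum of S, so S = a :: S'
      have hmin : ∀ x ∈ S, a ≤ x := by
        intro x hx
        rcases List.mem_cons.1 (hsub x hx) with h | h
        · exact le_of_eq h.symm
        · exact le_of_lt (hrest x h)
      obtain ⟨s, S', rfl⟩ : ∃ s S', S = s :: S' := by
        cases S with
        | nil => simp at hmem
        | cons s S' => exact ⟨s, S', rfl⟩
      have hsa : s = a := by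
        rcases List.mem_cons.1 hmem with h | h
        · exact h.symm
        · exact le_antisymm ((List.pairwise_cons.1 hps).1 a h) (hmin s (by simp))
      subst hsa
      set T := S'.dropWhile (· == s) with hT
      have hrun := run_split s S' hps.of_cons (fun y hy => hmin y (by simp [hy]))
      have hTsub : List.Sublist T S' := List.dropWhile_sublist _
      have hTp : T.Pairwise (· ≤ ·) := hps.of_cons.sublist hTsub
      have hTmem : ∀ x ∈ T, x ∈ rest := by
        intro x hx
        have hxS : x ∈ S' := hTsub.subset hx
        rcases List.mem_cons.1 (hsub x (by simp [hxS])) with h | h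
        · subst h
          exact absurd hx hrun.2
        · exact h
      -- counts and membership of every b ≠ s agree between s :: S' and T
      have hsplit : S'.takeWhile (· == s) ++ T = S' := List.takeWhile_append_dropWhile
      have htake_mem : ∀ y ∈ S'.takeWhile (· == s), y = s := by
        intro y hy
        simpa using List.mem_takeWhile_imp hy
      have hcount : ∀ b, b ≠ s → (s :: S').count b = T.count b := by
        intro b hb
        have h0 : (S'.takeWhile (· == s)).count b = 0 :=
          List.count_eq_zero.2 (fun hmem' => hb (htake_mem b hmem'))
        have hS'c : S'.count b = (S'.takeWhile (· == s)).count b + T.count b := by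
          conv_lhs => rw [← hsplit]
          rw [List.count_append]
        calc (s :: S').count b = S'.count b := by
              simp [Ne.symm hb]
          _ = (S'.takeWhile (· == s)).count b + T.count b := hS'c
          _ = T.count b := by rw [h0]; ring
      have hmemiff : ∀ b, b ≠ s → ((s :: S').contains b = T.contains b) := by
        intro b hb
        have : b ∈ s :: S' ↔ b ∈ T := by
          constructor
          · intro h
            rcases List.mem_cons.1 h with h | h
            · exact absurd h hb
            · rcases (by rw [hsplit]; exact h : b ∈ S'.takeWhile (· == s) ++ T) with _
              rcases List.mem_append.1 (by rw [hsplit]; exact h) with h2 | h2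
              · exact absurd (htake_mem b h2) hb
              · exact h2
          · intro h
            simp [hTsub.subset h]
        simp [this]
      have hne : ∀ b ∈ rest, b ≠ s := fun b hb => (hrest b hb).ne'
      have hfilter : rest.filter (fun b => (s :: S').contains b)
          = rest.filter (fun b => T.contains b) :=
        List.filter_congr (fun b hb => by rw [hmemiff b (hne b hb)])
      have hmap : (rest.filter (fun b => T.contains b)).map (fun b => ((s :: S').count b : Int))
          = (rest.filter (fun b => T.contains b)).map (fun b => (T.count b : Int)) := by
        refine List.map_congr_left (fun b hb => ?_)
        have hbrest : b ∈ rest := List.mem_of_mem_filter hb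
        rw [hcount b (hne b hbrest)]
      rw [runLens, List.filter_cons_of_pos (by simp), List.map_cons]
      congr 1
      · have : (s :: S').count s = 1 + (S'.takeWhile (· == s)).length := by
          simp [hrun.1, Nat.add_comm]
        rw [this]
      · rw [hfilter, hmap]
        exact ih T (List.pairwise_cons.1 hpa).2 hTp hTmem
    · -- a absent from S: skip it on both sides
      have hsub' : ∀ x ∈ S, x ∈ rest := by
        intro x hx
        rcases List.mem_cons.1 (hsub x hx) with h | h
        · exact absurd (h ▸ hx) hmem
        · exact h
      rw [List.filter_cons_of_neg (by simp [hmem])]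
      exact ih S (List.pairwise_cons.1 hpa).2 hps hsub'

-- ===== VERDICT (by name: the statement is the Claim_ definition above) =====
theorem anagram_proc_spec : Claim_equal_anagram_proc := by
  intro word _
  unfold Spec_anagram_proc
  simp only [anagram_proc, anagram_proc_alt]
  set alphabet : List Char := "abcdefghijklmnopqrstuvwxyz".toList with halpha
  set squashed : List Char := PySem.Chars.lower word.toList with hsq
  set L : List Char := squashed.filter (fun c => alphabet.contains c) with hL
  rw [PySem.List.foldl_append_if_eq_filter (fun c => alphabet.contains c) squashed [],
    List.nil_append, ← hL,
    PySem.List.foldl_append_if (fun l => L.contains l) (fun l => (L.count l : Int)) alphabet [],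
    List.nil_append]
  set S : List Char := PySem.List.sorted L (fun c => c) false with hS
  have hperm : S.Perm L := PySem.List.sorted_perm L (fun c => c) false
  have hpa : alphabet.Pairwise (· < ·) := by decide
  have hps : S.Pairwise (· ≤ ·) := by
    simpa using PySem.List.sorted_pairwise L (fun c => c)
  have hsub : ∀ x ∈ S, x ∈ alphabet := by
    intro x hx
    have hxL : x ∈ L := hperm.subset hx
    have := List.of_mem_filter hxL
    simpa [List.contains_iff_mem] using this
  rw [runLens_eq alphabet S hpa hps hsub]
  have hfc : alphabet.filter (fun b => S.contains b) = alphabet.filter (fun b => L.contains b) :=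
    List.filter_congr (fun b _ => by simp [hperm.mem_iff])
  have hmc : ∀ b ∈ alphabet.filter (fun b => L.contains b),
      (L.count b : Int) = (S.count b : Int) := by
    intro b _
    rw [hperm.count_eq]
  rw [hfc, List.map_congr_left hmc]
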